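-- pv_equiv track=rewrite | github.com/NikhilSetiya/Prism | ui/uploader.py | validate_asset_naming
-- ===== SOURCE A (Python) =====
-- from typing import List, Optional
--
-- def validate_asset_naming(filename: str, product_ids: List[str]) -> Optional[str]:
--     """
--     Check if asset filename matches expected pattern.
--
--     Expected patterns:
--     - {product_id}.png
--     - {product_id}_{aspect_ratio}.png
--
--     Returns:
--         None if valid, error message if invalid
--     """
--     name_without_ext = filename.rsplit('.', 1)[0]
--
--     # Check if it matches any product ID
--     for product_id in product_ids:
--         if name_without_ext == product_id:
--             return None
--         if name_without_ext.startswith(f"{product_id}_"):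
--             return None
--
--     return f"Filename '{filename}' doesn't match any product ID: {', '.join(product_ids)}"
-- ===== SOURCE B (Python) =====
-- from typing import List, Optional
--
-- def validate_asset_naming(filename: str, product_ids: List[str]) -> Optional[str]:
--     name_without_ext = filename.rsplit('.', 1)[0]
--     ids = set(product_ids)
--     if name_without_ext in ids:
--         return None
--     for i, ch in enumerate(name_without_ext):
--         if ch == '_' and name_without_ext[:i] in ids:
--             return None
--     return f"Filename '{filename}' doesn't match any product ID: {', '.join(product_ids)}"
-- ===== Notes on version B (the rewrite author's own statement) =====
-- stated objective: faster
-- what changed: Instead of scanning product_ids and testing equality/startswith per id, B builds a set of product_ids once and does O(1) membership lookups for the extension-stripped name and for its prefix at every underscore position.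
import Mathlib
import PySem

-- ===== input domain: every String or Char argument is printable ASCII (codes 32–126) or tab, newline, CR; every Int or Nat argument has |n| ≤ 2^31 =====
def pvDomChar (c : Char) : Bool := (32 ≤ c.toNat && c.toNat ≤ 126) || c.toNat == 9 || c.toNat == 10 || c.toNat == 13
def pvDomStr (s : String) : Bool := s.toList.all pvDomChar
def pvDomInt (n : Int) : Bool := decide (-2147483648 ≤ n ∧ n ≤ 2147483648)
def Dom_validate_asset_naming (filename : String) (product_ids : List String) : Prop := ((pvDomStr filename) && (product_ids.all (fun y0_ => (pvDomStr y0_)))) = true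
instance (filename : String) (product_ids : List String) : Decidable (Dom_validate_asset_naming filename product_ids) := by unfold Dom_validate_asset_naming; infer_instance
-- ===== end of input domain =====

-- B replaces A's per-id equality/startswith scan by one set of product_ids probed at the
-- name and at each underscore position of the name (objective: faster, set lookups).


-- shared by both ports: filename.rsplit('.', 1)[0], ported by hand via rfind
-- (PySem has no rsplit; exact: the piece before the LAST '.', or the whole string if none)
def pvStripExt (filename : String) : String :=
  let i := PySem.Str.rfind filename "."
  if i < 0 then filename else PySem.Str.slice filename none (some i)

-- shared by both ports: the f-string error message
def pvMsg (filename : String) (product_ids : List String) : String :=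
  PySem.Str.join "" ["Filename '", filename, "' doesn't match any product ID: ",
                     PySem.Str.join ", " product_ids]

-- ===== PORT A =====
-- the for-loop with its two early returns
def pvLoopA (name msg : String) : List String → Option String
  | [] => some msg
  | pid :: rest =>
    if name == pid then none
    else if PySem.Str.startswith name (pid ++ "_") then none
    else pvLoopA name msg rest

def validate_asset_naming (filename : String) (product_ids : List String) : Option String :=
  let name_without_ext := pvStripExt filename
  pvLoopA name_without_ext (pvMsg filename product_ids) product_ids

-- ===== PORT B =====
def validate_asset_naming_alt (filename : String) (product_ids : List String) : Option String :=
  let name_without_ext := pvStripExt filename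
  let ids : PySem.Set String := PySem.Set.ofList product_ids
  if PySem.Set.contains ids name_without_ext then none
  else if (PySem.List.enumerate name_without_ext.toList).any
            (fun p => p.2 == '_' &&
              PySem.Set.contains ids (PySem.Str.slice name_without_ext none (some p.1)))
  then none
  else some (pvMsg filename product_ids)

-- ===== PRECONDITION & SPEC =====
def Spec_validate_asset_naming (filename : String) (product_ids : List String) (out : Option String) : Prop := out = validate_asset_naming_alt filename product_ids
instance (filename : String) (product_ids : List String) (out : Option String) : Decidable (Spec_validate_asset_naming filename product_ids out) := by unfold Spec_validate_asset_naming; infer_instance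

-- ===== CLAIM (what is proved, stated in full; the proofs are below) =====
def Claim_equal_validate_asset_naming : Prop := ∀ (filename : String) (product_ids : List String), Dom_validate_asset_naming filename product_ids → Spec_validate_asset_naming filename product_ids (validate_asset_naming filename product_ids)

-- ===== LEMMAS AND PROOFS =====

theorem pvLoopA_eq_any (name msg : String) (pids : List String) :
    pvLoopA name msg pids =
      if pids.any (fun pid => name == pid || PySem.Str.startswith name (pid ++ "_"))
      then none else some msg := by
  induction pids with
  | nil => simp [pvLoopA]
  | cons pid rest ih =>
    simp only [pvLoopA, List.any_cons, ih]
    rcases Bool.eq_false_or_eq_true (name == pid) with h1 | h1 <;>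
      rcases Bool.eq_false_or_eq_true (PySem.Str.startswith name (pid ++ "_")) with h2 | h2 <;>
      rcases Bool.eq_false_or_eq_true
        (rest.any (fun pid => name == pid || PySem.Str.startswith name (pid ++ "_"))) with h3 | h3 <;>
      simp only [h1, h2, h3] <;> simp

-- the core: "some product_id equals the name or is a '_'-terminated prefix of it" is the same
-- test as "the name, or its prefix before some underscore, is in the set of product_ids"
theorem pv_hit_eq (name : String) (pids : List String) :
    pids.any (fun pid => name == pid || PySem.Str.startswith name (pid ++ "_")) =
    (PySem.Set.contains (PySem.Set.ofList pids) name ||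
      (PySem.List.enumerate name.toList).any
        (fun p => p.2 == '_' &&
          PySem.Set.contains (PySem.Set.ofList pids)
            (PySem.Str.slice name none (some p.1)))) := by
  rw [Bool.eq_iff_iff]
  simp only [List.any_eq_true, Bool.or_eq_true, Bool.and_eq_true, beq_iff_eq,
    PySem.Str.startswith_eq, PySem.Chars.startswith_iff,
    PySem.Set.contains_iff, PySem.Set.mem_ofList, PySem.List.mem_enumerate_iff]
  constructor
  · rintro ⟨pid, hmem, heq | hpre⟩
    · exact Or.inl (heq ▸ hmem)
    · refine Or.inr ?_
      obtain ⟨t, ht⟩ := hpre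
      have hlist : name.toList = pid.toList ++ '_' :: t := by
        rw [← ht]; simp
      have hk : pid.toList.length < name.toList.length := by
        rw [hlist]; simp
      have hget : name.toList[pid.toList.length] = '_' := by
        have h := hlist
        have : name.toList[pid.toList.length]? = some '_' := by
          rw [h, List.getElem?_append_right (Nat.le_refl _)]
          simp
        rw [List.getElem?_eq_getElem hk] at this
        exact Option.some.inj this
      refine ⟨((pid.toList.length : Int), '_'), ⟨pid.toList.length, hk, by rw [hget]; simp⟩, rfl, ?_⟩
      have hslice : (PySem.Str.slice name none (some (pid.toList.length : Int))).toList = pid.toList := by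
        rw [PySem.Str.toList_slice, PySem.Chars.slice_eq_listSlice,
          PySem.List.slice_to_natCast, hlist, List.take_left]
      have heq : PySem.Str.slice name none (some ((pid.toList.length : Int))) = pid :=
        String.toList_inj.mp hslice
      show PySem.Str.slice name none (some ((pid.toList.length : Int))) ∈ pids
      rw [heq]; exact hmem
  · rintro (hmem | ⟨p, ⟨k, hk, hp⟩, hund, hmem⟩)
    · exact ⟨name, hmem, Or.inl rfl⟩
    · refine ⟨PySem.Str.slice name none (some p.1), hmem, Or.inr ?_⟩
      have hslice : (PySem.Str.slice name none (some p.1)).toList = name.toList.take k := by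
        rw [hp]
        rw [PySem.Str.toList_slice, PySem.Chars.slice_eq_listSlice]
        have : ((0 : Int) + (k : Int)) = ((k : Nat) : Int) := by omega
        rw [this, PySem.List.slice_to_natCast]
      rw [String.toList_append, hslice]
      have hu : "_".toList = ['_'] := rfl
      rw [hu]
      have hc : name.toList[k] = '_' := by
        have : p.2 = '_' := hund
        rw [hp] at this; exact this
      have : name.toList.take k ++ ['_'] = name.toList.take (k + 1) := by
        rw [List.take_add_one, List.getElem?_eq_getElem hk, hc]; rfl
      rw [this]
      exact List.take_prefix _ _

-- ===== VERDICT (by name: the statement is the Claim_ definition above) =====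
theorem validate_asset_naming_spec : Claim_equal_validate_asset_naming := by
  intro filename pids _
  unfold Spec_validate_asset_naming validate_asset_naming validate_asset_naming_alt
  simp only [pvLoopA_eq_any, pv_hit_eq]
  cases h1 : PySem.Set.contains (PySem.Set.ofList pids) (pvStripExt filename) <;>
    cases h2 : (PySem.List.enumerate (pvStripExt filename).toList).any
      (fun p => p.2 == '_' &&
        PySem.Set.contains (PySem.Set.ofList pids)
          (PySem.Str.slice (pvStripExt filename) none (some p.1))) <;>
    simp
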